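-- pv_equiv track=rewrite | github.com/Burnetb8/Senior-Capstone | model_training/lisp_parser.py | get_string_and_normalize
-- ===== SOURCE A (Python) =====
-- def get_string_and_normalize(string: str) -> str:
--     if string is None:
--         return ""
--
--     string = string.replace("\n", " ")
--     string = string.replace("\t", " ")
--     string = string.strip()
--
--     # these mongoloids wrote out contractions in AT LEAST 5 DIFFERENT WAYS
--     # so here are special cases to normalize all of them (e.g. the contraction
--     # for 'we will' ("we'll"), shows up as "we 'll", "we' ll", "we'll", "we ' ll", and "we (QUOTE ll)", wtf)
--     #
--     # according to the limited lexical analysis I've done on this data,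
--     # all 5 cases should be covered and normalized by this code
--     while string.find("  ") != -1:
--         string = string.replace("  ", " ")
--     while string.find(" '") != -1:
--         string = string.replace(" '", "'")
--     while string.find("' ") != -1:
--         string = string.replace("' ", "'")
--
--     return string
-- ===== SOURCE B (Python) =====
-- def get_string_and_normalize(string: str) -> str:
--     if string is None:
--         return ""
--     string = string.replace("\n", " ").replace("\t", " ").strip()
--     out = []
--     pending = False
--     last_quote = False
--     for ch in string:
--         if ch == " ":
--             pending = True
--         elif ch == "'":
--             out.append("'")
--             pending = False
--             last_quote = True
--         else:
--             if pending and not last_quote: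
--                 out.append(" ")
--             out.append(ch)
--             pending = False
--             last_quote = False
--     return "".join(out)
-- ===== Notes on version B (the rewrite author's own statement) =====
-- stated objective: alternative
-- what changed: Replaces the three fixpoint str.replace while-loops (collapse double spaces, drop space before and after apostrophes) by a single forward scan that keeps a pending-space flag and a last-emitted-was-apostrophe flag and builds the output in one pass.
import Mathlib
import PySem

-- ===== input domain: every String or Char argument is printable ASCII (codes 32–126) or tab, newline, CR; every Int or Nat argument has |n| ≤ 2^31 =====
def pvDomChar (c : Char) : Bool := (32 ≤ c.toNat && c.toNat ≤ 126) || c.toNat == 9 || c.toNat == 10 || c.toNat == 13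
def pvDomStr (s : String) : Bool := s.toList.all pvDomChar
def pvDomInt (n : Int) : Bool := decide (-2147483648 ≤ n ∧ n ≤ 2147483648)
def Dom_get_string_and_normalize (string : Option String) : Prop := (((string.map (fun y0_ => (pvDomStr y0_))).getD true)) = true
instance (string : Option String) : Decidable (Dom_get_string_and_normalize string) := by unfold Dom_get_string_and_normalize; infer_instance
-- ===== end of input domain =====

-- B replaces A's three fixpoint str.replace while-loops by one forward scan with a
-- pending-space flag; same return value on every input (objective: alternative, not faster).

-- ===== PORT A =====
-- helper characterisation of PySem.Chars.replace for a 2-char pattern, needed only to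
-- justify termination of the while-loops (cited by `decreasing_by`)
def pvRep2 (a b c : Char) : List Char → List Char
  | [] => []
  | [x] => [x]
  | x :: y :: t => if x = a ∧ y = b then c :: pvRep2 a b c t else x :: pvRep2 a b c (y :: t)

theorem pvReplace_go_eq (a b c : Char) : ∀ (fuel : Nat) (l acc : List Char), l.length ≤ fuel →
    PySem.Chars.replace.go [a, b] [c] fuel l acc = acc.reverse ++ pvRep2 a b c l := by
  intro fuel
  induction fuel with
  | zero =>
    intro l acc h
    have : l = [] := List.eq_nil_of_length_eq_zero (Nat.le_zero.mp h)
    subst this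
    simp [PySem.Chars.replace.go, pvRep2]
  | succ n ih =>
    intro l acc h
    match l with
    | [] => simp [PySem.Chars.replace.go, pvRep2]
    | [x] =>
      have hpre : List.isPrefixOf [a, b] [x] = false := by
        simp [List.isPrefixOf]
      rw [PySem.Chars.replace.go]
      rw [hpre]
      simp only [Bool.false_eq_true, if_false]
      rw [ih [] (x :: acc) (by simp)]
      simp [pvRep2]
    | x :: y :: t =>
      rw [PySem.Chars.replace.go]
      by_cases hxy : x = a ∧ y = b
      · obtain ⟨hx, hy⟩ := hxy
        subst hx; subst hy
        have hpre : List.isPrefixOf [x, y] (x :: y :: t) = true := by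
          simp [List.isPrefixOf]
        rw [hpre]
        simp only [if_true]
        have ht : t.length ≤ n := by simp at h; omega
        rw [show List.drop [x, y].length (x :: y :: t) = t from rfl]
        rw [ih t _ ht]
        simp [pvRep2]
      · have hpre : List.isPrefixOf [a, b] (x :: y :: t) = false := by
          simp [List.isPrefixOf]
          intro hx hy
          exact absurd ⟨hx.symm, hy.symm⟩ hxy
        rw [hpre]
        simp only [Bool.false_eq_true, if_false]
        have ht : (y :: t).length ≤ n := by simp at h; simp; omega
        rw [ih (y :: t) (x :: acc) ht]
        simp [pvRep2, hxy]

theorem pvReplace_eq (a b c : Char) (l : List Char) :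
    PySem.Chars.replace l [a, b] [c] = pvRep2 a b c l := by
  rw [PySem.Chars.replace]
  simp only [List.isEmpty, Bool.false_eq_true, if_false]
  exact pvReplace_go_eq a b c l.length l [] le_rfl

theorem pvRep2_length_le (a b c : Char) : ∀ m : List Char,
    (pvRep2 a b c m).length ≤ m.length := by
  intro m
  induction m using pvRep2.induct a b with
  | case1 => simp [pvRep2]
  | case2 z => simp [pvRep2]
  | case3 z w t' hzw ih' =>
    simp only [pvRep2, if_pos hzw, List.length_cons]
    omega
  | case4 z w t' hzw ih' =>
    simp only [pvRep2, if_neg hzw, List.length_cons]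
    simp only [List.length_cons] at ih'
    omega

theorem pvRep2_length_lt (a b c : Char) : ∀ l : List Char, [a, b] <:+: l →
    (pvRep2 a b c l).length < l.length := by
  intro l
  induction l using pvRep2.induct a b with
  | case1 => intro h; exact absurd (List.IsInfix.length_le h) (by simp)
  | case2 x => intro h; exact absurd (List.IsInfix.length_le h) (by simp)
  | case3 x y t hxy ih =>
    intro _
    simp only [pvRep2, if_pos hxy, List.length_cons]
    have := pvRep2_length_le a b c t
    omega
  | case4 x y t hxy ih =>
    intro h
    rcases (List.infix_cons_iff).mp h with hp | hi
    · rcases (List.cons_prefix_cons).mp hp with ⟨hx, hp'⟩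
      rcases (List.cons_prefix_cons).mp hp' with ⟨hy, _⟩
      exact absurd ⟨hx.symm, hy.symm⟩ hxy
    · simp only [pvRep2, if_neg hxy, List.length_cons]
      have := ih hi
      simp only [List.length_cons] at this
      omega

theorem pvReplace_length_lt (a b c : Char) (l : List Char)
    (h : PySem.Chars.find l [a, b] ≠ -1) :
    (PySem.Chars.replace l [a, b] [c]).length < l.length := by
  rw [pvReplace_eq]
  exact pvRep2_length_lt a b c l ((PySem.Chars.find_ne_neg_one_iff l [a, b]).mp h)

-- while string.find("  ") != -1: string = string.replace("  ", " ")
def pvLoop1 (l : List Char) : List Char :=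
  if h : PySem.Chars.find l [' ', ' '] ≠ -1 then
    pvLoop1 (PySem.Chars.replace l [' ', ' '] [' '])
  else l
termination_by l.length
decreasing_by exact pvReplace_length_lt ' ' ' ' ' ' l h

-- while string.find(" '") != -1: string = string.replace(" '", "'")
def pvLoop2 (l : List Char) : List Char :=
  if h : PySem.Chars.find l [' ', '\''] ≠ -1 then
    pvLoop2 (PySem.Chars.replace l [' ', '\''] ['\''])
  else l
termination_by l.length
decreasing_by exact pvReplace_length_lt ' ' '\'' '\'' l h

-- while string.find("' ") != -1: string = string.replace("' ", "'")
def pvLoop3 (l : List Char) : List Char :=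
  if h : PySem.Chars.find l ['\'', ' '] ≠ -1 then
    pvLoop3 (PySem.Chars.replace l ['\'', ' '] ['\''])
  else l
termination_by l.length
decreasing_by exact pvReplace_length_lt '\'' ' ' '\'' l h

def get_string_and_normalize (string : Option String) : String :=
  match string with
  | none => ""
  | some s =>
    let s1 := PySem.Str.replace s "\n" " "
    let s2 := PySem.Str.replace s1 "\t" " "
    let s3 := PySem.Str.strip s2
    String.mk (pvLoop3 (pvLoop2 (pvLoop1 s3.toList)))

-- ===== PORT B =====
-- body of B's for-loop: state = (out, pending, last_quote)
def pvStep (st : List Char × Bool × Bool) (ch : Char) : List Char × Bool × Bool :=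
  if ch = ' ' then (st.1, true, st.2.2)
  else if ch = '\'' then (st.1 ++ ['\''], false, true)
  else ((if st.2.1 && !st.2.2 then st.1 ++ [' '] else st.1) ++ [ch], false, false)

def get_string_and_normalize_alt (string : Option String) : String :=
  match string with
  | none => ""
  | some s =>
    let s1 := PySem.Str.replace s "\n" " "
    let s2 := PySem.Str.replace s1 "\t" " "
    let s3 := PySem.Str.strip s2
    String.mk (s3.toList.foldl pvStep ([], false, false)).1

-- ===== PRECONDITION & SPEC =====
def Spec_get_string_and_normalize (string : Option String) (out : String) : Prop := out = get_string_and_normalize_alt string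
instance (string : Option String) (out : String) : Decidable (Spec_get_string_and_normalize string out) := by unfold Spec_get_string_and_normalize; infer_instance

-- ===== CLAIM (what is proved, stated in full; the proofs are below) =====
def Claim_equal_get_string_and_normalize : Prop := ∀ (string : Option String), Dom_get_string_and_normalize string → Spec_get_string_and_normalize string (get_string_and_normalize string)

-- ===== LEMMAS AND PROOFS =====

-- B's scan, written as a recursion (pending, last_quote, rest)
def pvScan : Bool → Bool → List Char → List Char
  | _, _, [] => []
  | p, q, c :: t =>
    if c = ' ' then pvScan true q t
    else if c = '\'' then '\'' :: pvScan false true t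
    else if p && !q then ' ' :: c :: pvScan false false t
    else c :: pvScan false false t

theorem pvFoldl_eq : ∀ (t out : List Char) (p q : Bool),
    (t.foldl pvStep (out, p, q)).1 = out ++ pvScan p q t := by
  intro t
  induction t with
  | nil => intro out p q; simp [pvScan]
  | cons c t ih =>
    intro out p q
    rw [List.foldl_cons]
    by_cases hc : c = ' '
    · rw [show pvStep (out, p, q) c = (out, true, q) by simp [pvStep, hc]]
      rw [ih]
      simp [pvScan, hc]
    · by_cases hq : c = '\''
      · rw [show pvStep (out, p, q) c = (out ++ ['\''], false, true) by simp [pvStep, hc, hq]]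
        rw [ih]
        simp [pvScan, hc, hq]
      · by_cases hp : (p && !q) = true
        · rw [show pvStep (out, p, q) c = (out ++ [' '] ++ [c], false, false) by
              simp [pvStep, hc, hq, hp]]
          rw [ih]
          simp [pvScan, hc, hq, hp]
        · rw [show pvStep (out, p, q) c = (out ++ [c], false, false) by
              simp [pvStep, hc, hq, hp]]
          rw [ih]
          simp [pvScan, hc, hq, hp]

-- pair-infix characterisation
theorem pvInfixPair (u v x : Char) (xs : List Char) :
    [u, v] <:+: (x :: xs) ↔ (x = u ∧ xs.head? = some v) ∨ [u, v] <:+: xs := by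
  rw [List.infix_cons_iff]
  constructor
  · rintro (hp | hi)
    · left
      rcases (List.cons_prefix_cons).mp hp with ⟨hx, hp'⟩
      refine ⟨hx.symm, ?_⟩
      match xs, hp' with
      | y :: ys, hp' =>
        rcases (List.cons_prefix_cons).mp hp' with ⟨hy, _⟩
        simp [hy.symm]
    · right; exact hi
  · rintro (⟨hx, hh⟩ | hi)
    · left
      subst hx
      match xs, hh with
      | y :: ys, hh =>
        simp at hh
        subst hh
        exact (List.cons_prefix_cons).mpr ⟨rfl, (List.cons_prefix_cons).mpr ⟨rfl, List.nil_prefix⟩⟩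
    · right; exact hi

theorem pvInfix_of_cons (u v x : Char) (xs : List Char) (h : ¬ [u, v] <:+: (x :: xs)) :
    ¬ [u, v] <:+: xs := by
  intro hc
  exact h ((pvInfixPair u v x xs).mpr (Or.inr hc))

theorem pvRep2_ne_nil (a b c : Char) (l : List Char) (h : l ≠ []) : pvRep2 a b c l ≠ [] := by
  match l with
  | [x] => simp [pvRep2]
  | x :: y :: t =>
    by_cases hxy : x = a ∧ y = b
    · simp [pvRep2, hxy]
    · simp [pvRep2, hxy]

theorem pvRep2_head? (a b c : Char) (l : List Char) (ch : Char)
    (h : (pvRep2 a b c l).head? = some ch) :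
    (ch = c ∧ l.head? = some a) ∨ l.head? = some ch := by
  match l with
  | [] => simp [pvRep2] at h
  | [x] => simp [pvRep2] at h; simp [h]
  | x :: y :: t =>
    by_cases hxy : x = a ∧ y = b
    · simp [pvRep2, hxy] at h
      exact Or.inl ⟨h.symm, by simp [hxy.1]⟩
    · simp [pvRep2, hxy] at h
      exact Or.inr (by simp [h])

theorem pvGetLast?_cons (x : Char) (xs : List Char) (h : xs ≠ []) :
    (x :: xs).getLast? = xs.getLast? := by
  match xs with
  | y :: ys => rw [List.getLast?_cons_cons]

theorem pvRep2_getLast? (a b c : Char) : ∀ (l : List Char) (ch : Char),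
    (pvRep2 a b c l).getLast? = some ch →
    (ch = c ∧ l.getLast? = some b) ∨ l.getLast? = some ch := by
  intro l
  induction l using pvRep2.induct a b with
  | case1 => intro ch h; simp [pvRep2] at h
  | case2 x => intro ch h; simp [pvRep2] at h; simp [h]
  | case3 x y t hxy ih =>
    intro ch h
    rw [show pvRep2 a b c (x :: y :: t) = c :: pvRep2 a b c t by
          simp only [pvRep2, if_pos hxy]] at h
    cases t with
    | nil =>
      simp [pvRep2] at h
      refine Or.inl ⟨h.symm, ?_⟩
      simp [hxy.2]
    | cons z t' =>
      rw [pvGetLast?_cons c _ (pvRep2_ne_nil a b c (z :: t') (by simp))] at h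
      rcases ih ch h with ⟨hc, hl⟩ | hl
      · exact Or.inl ⟨hc, by rw [List.getLast?_cons_cons, pvGetLast?_cons y _ (by simp)]; exact hl⟩
      · exact Or.inr (by rw [List.getLast?_cons_cons, pvGetLast?_cons y _ (by simp)]; exact hl)
  | case4 x y t hxy ih =>
    intro ch h
    rw [show pvRep2 a b c (x :: y :: t) = x :: pvRep2 a b c (y :: t) by
          simp only [pvRep2, if_neg hxy]] at h
    rw [pvGetLast?_cons x _ (pvRep2_ne_nil a b c (y :: t) (by simp))] at h
    rcases ih ch h with ⟨hc, hl⟩ | hl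
    · exact Or.inl ⟨hc, by rw [List.getLast?_cons_cons]; exact hl⟩
    · exact Or.inr (by rw [List.getLast?_cons_cons]; exact hl)

-- pass 2 preserves "no double space"; pass 3 preserves "no double space" and "no space-before-quote"
theorem pvQgen (a b c u v : Char) (hcu : c ≠ u) (hcva : c = v → a = v) :
    ∀ l : List Char, ¬ [u, v] <:+: l → ¬ [u, v] <:+: pvRep2 a b c l := by
  intro l
  induction l using pvRep2.induct a b with
  | case1 =>
    intro _ h
    rw [show pvRep2 a b c [] = [] from rfl] at h
    exact absurd (List.IsInfix.length_le h) (by simp)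
  | case2 x =>
    intro _ h
    rw [show pvRep2 a b c [x] = [x] from rfl] at h
    exact absurd (List.IsInfix.length_le h) (by simp)
  | case3 x y t hxy ih =>
    intro hno h
    rw [show pvRep2 a b c (x :: y :: t) = c :: pvRep2 a b c t by
          simp only [pvRep2, if_pos hxy]] at h
    rcases (pvInfixPair _ _ _ _).mp h with ⟨hc, _⟩ | hi
    · exact hcu hc
    · exact ih (pvInfix_of_cons _ _ _ _ (pvInfix_of_cons _ _ _ _ hno)) hi
  | case4 x y t hxy ih =>
    intro hno h
    rw [show pvRep2 a b c (x :: y :: t) = x :: pvRep2 a b c (y :: t) by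
          simp only [pvRep2, if_neg hxy]] at h
    rcases (pvInfixPair _ _ _ _).mp h with ⟨hx, hh⟩ | hi
    · subst hx
      have hyv : y = v := by
        rcases pvRep2_head? a b c _ _ hh with ⟨hvc, hl⟩ | hl
        · simp only [List.head?_cons, Option.some.injEq] at hl
          exact hl.trans (hcva hvc.symm)
        · simp only [List.head?_cons, Option.some.injEq] at hl
          exact hl
      exact hno ((pvInfixPair _ _ _ _).mpr (Or.inl ⟨rfl, by simp [hyv]⟩))
    · exact ih (pvInfix_of_cons _ _ _ _ hno) hi

theorem pvQ1 (l : List Char) (h : ¬ [' ', ' '] <:+: l) :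
    ¬ [' ', ' '] <:+: pvRep2 ' ' '\'' '\'' l :=
  pvQgen ' ' '\'' '\'' ' ' ' ' (by decide) (by decide) l h

theorem pvQ2 (l : List Char) (h : ¬ [' ', ' '] <:+: l) :
    ¬ [' ', ' '] <:+: pvRep2 '\'' ' ' '\'' l :=
  pvQgen '\'' ' ' '\'' ' ' ' ' (by decide) (by decide) l h

theorem pvQ3 (l : List Char) (h : ¬ [' ', '\''] <:+: l) :
    ¬ [' ', '\''] <:+: pvRep2 '\'' ' ' '\'' l :=
  pvQgen '\'' ' ' '\'' ' ' '\'' (by decide) (by decide) l h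

-- the scan ignores pending when the last emitted char is a quote
theorem pvScan_tt (t : List Char) : pvScan true true t = pvScan false true t := by
  match t with
  | [] => rfl
  | c :: r =>
    by_cases hc : c = ' '
    · simp [pvScan, hc]
    · by_cases hq : c = '\''
      · simp [pvScan, hc, hq]
      · simp [pvScan, hc, hq]

-- one-step unfoldings of the scan
theorem pvScan_space (p q : Bool) (t : List Char) :
    pvScan p q (' ' :: t) = pvScan true q t := by simp [pvScan]

theorem pvScan_quote (p q : Bool) (t : List Char) :
    pvScan p q ('\'' :: t) = '\'' :: pvScan false true t := by simp [pvScan]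

theorem pvScan_other (c : Char) (hc : c ≠ ' ') (hq : c ≠ '\'') (p q : Bool) (t : List Char) :
    pvScan p q (c :: t) =
      if p && !q then ' ' :: c :: pvScan false false t else c :: pvScan false false t := by
  simp [pvScan, hc, hq]

-- scan is invariant under each replace pass
theorem pvScan_rep1 : ∀ (l : List Char) (p q : Bool),
    pvScan p q (pvRep2 ' ' ' ' ' ' l) = pvScan p q l := by
  intro l
  induction l using pvRep2.induct ' ' ' ' with
  | case1 => intro p q; simp [pvRep2]
  | case2 x => intro p q; simp [pvRep2]
  | case3 x y t hxy ih =>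
    intro p q
    obtain ⟨hx, hy⟩ := hxy
    subst hx; subst hy
    rw [show pvRep2 ' ' ' ' ' ' (' ' :: ' ' :: t) = ' ' :: pvRep2 ' ' ' ' ' ' t by
          simp [pvRep2]]
    rw [pvScan_space, ih, pvScan_space, pvScan_space]
  | case4 x y t hxy ih =>
    intro p q
    rw [show pvRep2 ' ' ' ' ' ' (x :: y :: t) = x :: pvRep2 ' ' ' ' ' ' (y :: t) by
          simp only [pvRep2, if_neg hxy]]
    rcases eq_or_ne x ' ' with hx | hx
    · subst hx; rw [pvScan_space, pvScan_space, ih]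
    · rcases eq_or_ne x '\'' with hx2 | hx2
      · subst hx2; rw [pvScan_quote, pvScan_quote, ih]
      · rw [pvScan_other x hx hx2, pvScan_other x hx hx2, ih]

theorem pvScan_rep2 : ∀ (l : List Char) (p q : Bool),
    pvScan p q (pvRep2 ' ' '\'' '\'' l) = pvScan p q l := by
  intro l
  induction l using pvRep2.induct ' ' '\'' with
  | case1 => intro p q; simp [pvRep2]
  | case2 x => intro p q; simp [pvRep2]
  | case3 x y t hxy ih =>
    intro p q
    obtain ⟨hx, hy⟩ := hxy
    subst hx; subst hy
    rw [show pvRep2 ' ' '\'' '\'' (' ' :: '\'' :: t) = '\'' :: pvRep2 ' ' '\'' '\'' t by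
          simp [pvRep2]]
    rw [pvScan_quote, ih, pvScan_space, pvScan_quote]
  | case4 x y t hxy ih =>
    intro p q
    rw [show pvRep2 ' ' '\'' '\'' (x :: y :: t) = x :: pvRep2 ' ' '\'' '\'' (y :: t) by
          simp only [pvRep2, if_neg hxy]]
    rcases eq_or_ne x ' ' with hx | hx
    · subst hx; rw [pvScan_space, pvScan_space, ih]
    · rcases eq_or_ne x '\'' with hx2 | hx2
      · subst hx2; rw [pvScan_quote, pvScan_quote, ih]
      · rw [pvScan_other x hx hx2, pvScan_other x hx hx2, ih]

theorem pvScan_rep3 : ∀ (l : List Char) (p q : Bool),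
    pvScan p q (pvRep2 '\'' ' ' '\'' l) = pvScan p q l := by
  intro l
  induction l using pvRep2.induct '\'' ' ' with
  | case1 => intro p q; simp [pvRep2]
  | case2 x => intro p q; simp [pvRep2]
  | case3 x y t hxy ih =>
    intro p q
    obtain ⟨hx, hy⟩ := hxy
    subst hx; subst hy
    rw [show pvRep2 '\'' ' ' '\'' ('\'' :: ' ' :: t) = '\'' :: pvRep2 '\'' ' ' '\'' t by
          simp [pvRep2]]
    rw [pvScan_quote, ih, pvScan_quote, pvScan_space, pvScan_tt]
  | case4 x y t hxy ih =>
    intro p q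
    rw [show pvRep2 '\'' ' ' '\'' (x :: y :: t) = x :: pvRep2 '\'' ' ' '\'' (y :: t) by
          simp only [pvRep2, if_neg hxy]]
    rcases eq_or_ne x ' ' with hx | hx
    · subst hx; rw [pvScan_space, pvScan_space, ih]
    · rcases eq_or_ne x '\'' with hx2 | hx2
      · subst hx2; rw [pvScan_quote, pvScan_quote, ih]
      · rw [pvScan_other x hx hx2, pvScan_other x hx hx2, ih]

-- loop-level facts.  Each pvLoopK is iterated pvRep2, so:
theorem pvLoop1_scan (l : List Char) : ∀ p q, pvScan p q (pvLoop1 l) = pvScan p q l := by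
  induction l using pvLoop1.induct with
  | case1 l h ih =>
    intro p q
    rw [pvLoop1, dif_pos h]
    rw [ih p q, pvReplace_eq, pvScan_rep1]
  | case2 l h =>
    intro p q
    rw [pvLoop1, dif_neg h]

theorem pvLoop2_scan (l : List Char) : ∀ p q, pvScan p q (pvLoop2 l) = pvScan p q l := by
  induction l using pvLoop2.induct with
  | case1 l h ih =>
    intro p q
    rw [pvLoop2, dif_pos h]
    rw [ih p q, pvReplace_eq, pvScan_rep2]
  | case2 l h =>
    intro p q
    rw [pvLoop2, dif_neg h]

theorem pvLoop3_scan (l : List Char) : ∀ p q, pvScan p q (pvLoop3 l) = pvScan p q l := by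
  induction l using pvLoop3.induct with
  | case1 l h ih =>
    intro p q
    rw [pvLoop3, dif_pos h]
    rw [ih p q, pvReplace_eq, pvScan_rep3]
  | case2 l h =>
    intro p q
    rw [pvLoop3, dif_neg h]

theorem pvLoop1_no (l : List Char) : ¬ [' ', ' '] <:+: pvLoop1 l := by
  induction l using pvLoop1.induct with
  | case1 l h ih => rw [pvLoop1, dif_pos h]; exact ih
  | case2 l h =>
    rw [pvLoop1, dif_neg h]
    simp at h
    exact (PySem.Chars.find_eq_neg_one_iff l [' ', ' ']).mp h

theorem pvLoop2_no (l : List Char) : ¬ [' ', '\''] <:+: pvLoop2 l := by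
  induction l using pvLoop2.induct with
  | case1 l h ih => rw [pvLoop2, dif_pos h]; exact ih
  | case2 l h =>
    rw [pvLoop2, dif_neg h]
    simp at h
    exact (PySem.Chars.find_eq_neg_one_iff l [' ', '\'']).mp h

theorem pvLoop3_no (l : List Char) : ¬ ['\'', ' '] <:+: pvLoop3 l := by
  induction l using pvLoop3.induct with
  | case1 l h ih => rw [pvLoop3, dif_pos h]; exact ih
  | case2 l h =>
    rw [pvLoop3, dif_neg h]
    simp at h
    exact (PySem.Chars.find_eq_neg_one_iff l ['\'', ' ']).mp h

theorem pvLoop2_pres1 (l : List Char) (h : ¬ [' ', ' '] <:+: l) :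
    ¬ [' ', ' '] <:+: pvLoop2 l := by
  induction l using pvLoop2.induct with
  | case1 l hf ih =>
    rw [pvLoop2, dif_pos hf]
    exact ih (by rw [pvReplace_eq]; exact pvQ1 l h)
  | case2 l hf => rw [pvLoop2, dif_neg hf]; exact h

theorem pvLoop3_pres1 (l : List Char) (h : ¬ [' ', ' '] <:+: l) :
    ¬ [' ', ' '] <:+: pvLoop3 l := by
  induction l using pvLoop3.induct with
  | case1 l hf ih =>
    rw [pvLoop3, dif_pos hf]
    exact ih (by rw [pvReplace_eq]; exact pvQ2 l h)
  | case2 l hf => rw [pvLoop3, dif_neg hf]; exact h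

theorem pvLoop3_pres2 (l : List Char) (h : ¬ [' ', '\''] <:+: l) :
    ¬ [' ', '\''] <:+: pvLoop3 l := by
  induction l using pvLoop3.induct with
  | case1 l hf ih =>
    rw [pvLoop3, dif_pos hf]
    exact ih (by rw [pvReplace_eq]; exact pvQ3 l h)
  | case2 l hf => rw [pvLoop3, dif_neg hf]; exact h

theorem pvLoop1_last (l : List Char) (h : l.getLast? ≠ some ' ') :
    (pvLoop1 l).getLast? ≠ some ' ' := by
  induction l using pvLoop1.induct with
  | case1 l hf ih =>
    rw [pvLoop1, dif_pos hf]
    refine ih ?_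
    rw [pvReplace_eq]
    intro hc
    rcases pvRep2_getLast? ' ' ' ' ' ' l ' ' hc with ⟨_, hl⟩ | hl
    · exact h hl
    · exact h hl
  | case2 l hf => rw [pvLoop1, dif_neg hf]; exact h

theorem pvLoop2_last (l : List Char) (h : l.getLast? ≠ some ' ') :
    (pvLoop2 l).getLast? ≠ some ' ' := by
  induction l using pvLoop2.induct with
  | case1 l hf ih =>
    rw [pvLoop2, dif_pos hf]
    refine ih ?_
    rw [pvReplace_eq]
    intro hc
    rcases pvRep2_getLast? ' ' '\'' '\'' l ' ' hc with ⟨hch, _⟩ | hl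
    · exact absurd hch (by decide)
    · exact h hl
  | case2 l hf => rw [pvLoop2, dif_neg hf]; exact h

theorem pvLoop3_last (l : List Char) (h : l.getLast? ≠ some ' ') :
    (pvLoop3 l).getLast? ≠ some ' ' := by
  induction l using pvLoop3.induct with
  | case1 l hf ih =>
    rw [pvLoop3, dif_pos hf]
    refine ih ?_
    rw [pvReplace_eq]
    intro hc
    rcases pvRep2_getLast? '\'' ' ' '\'' l ' ' hc with ⟨hch, _⟩ | hl
    · exact absurd hch (by decide)
    · exact h hl
  | case2 l hf => rw [pvLoop3, dif_neg hf]; exact h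

-- a string with no "  ", " '", "' " and no trailing space is a fixpoint of the scan
theorem pvFix : ∀ l : List Char,
    ¬ [' ', ' '] <:+: l → ¬ [' ', '\''] <:+: l → ¬ ['\'', ' '] <:+: l →
    l.getLast? ≠ some ' ' →
    ∀ q : Bool, (q = true → l.head? ≠ some ' ') → pvScan false q l = l := by
  intro l
  induction l with
  | nil => intro _ _ _ _ q _; rfl
  | cons c t ih =>
    intro h1 h2 h3 h4 q hq
    by_cases hc : c = ' '
    · subst hc
      have hqf : q = false := by
        cases q
        · rfl
        · exact absurd rfl (fun hh => hq hh (by simp))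
      subst hqf
      match t, h1, h2, h4, ih with
      | [], h1, h2, h4, ih => exact absurd (by simp) h4
      | d :: t', h1, h2, h4, ih =>
        have hd1 : d ≠ ' ' := by
          intro hd
          exact h1 ((pvInfixPair _ _ _ _).mpr (Or.inl ⟨rfl, by simp [hd]⟩))
        have hd2 : d ≠ '\'' := by
          intro hd
          exact h2 ((pvInfixPair _ _ _ _).mpr (Or.inl ⟨rfl, by simp [hd]⟩))
        have iht : pvScan false false (d :: t') = d :: t' :=
          ih (pvInfix_of_cons _ _ _ _ h1) (pvInfix_of_cons _ _ _ _ h2)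
             (pvInfix_of_cons _ _ _ _ h3)
             (by rwa [pvGetLast?_cons _ _ (by simp)] at h4)
             false (by simp)
        have iht' : pvScan false false t' = t' := by
          simpa [pvScan, hd1, hd2] using iht
        simp [pvScan, hd1, hd2, iht']
    · by_cases hcq : c = '\''
      · subst hcq
        have hth : t.head? ≠ some ' ' := by
          intro hh
          exact h3 ((pvInfixPair _ _ _ _).mpr (Or.inl ⟨rfl, hh⟩))
        have iht : pvScan false true t = t := by
          match t with
          | [] => rfl
          | d :: t' =>
            exact ih (pvInfix_of_cons _ _ _ _ h1) (pvInfix_of_cons _ _ _ _ h2)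
              (pvInfix_of_cons _ _ _ _ h3)
              (by rwa [pvGetLast?_cons _ _ (by simp)] at h4)
              true (fun _ => hth)
        simp [pvScan, hc, iht]
      · have iht : pvScan false false t = t := by
          match t with
          | [] => rfl
          | d :: t' =>
            exact ih (pvInfix_of_cons _ _ _ _ h1) (pvInfix_of_cons _ _ _ _ h2)
              (pvInfix_of_cons _ _ _ _ h3)
              (by rwa [pvGetLast?_cons _ _ (by simp)] at h4)
              false (by simp)
        simp [pvScan, hc, hcq, iht]

theorem pvMain (l : List Char) (h4 : l.getLast? ≠ some ' ') :
    pvLoop3 (pvLoop2 (pvLoop1 l)) = pvScan false false l := by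
  have n1 : ¬ [' ', ' '] <:+: pvLoop1 l := pvLoop1_no l
  have n1' : ¬ [' ', ' '] <:+: pvLoop2 (pvLoop1 l) := pvLoop2_pres1 _ n1
  have n2 : ¬ [' ', '\''] <:+: pvLoop2 (pvLoop1 l) := pvLoop2_no _
  have n1'' : ¬ [' ', ' '] <:+: pvLoop3 (pvLoop2 (pvLoop1 l)) := pvLoop3_pres1 _ n1'
  have n2' : ¬ [' ', '\''] <:+: pvLoop3 (pvLoop2 (pvLoop1 l)) := pvLoop3_pres2 _ n2
  have n3 : ¬ ['\'', ' '] <:+: pvLoop3 (pvLoop2 (pvLoop1 l)) := pvLoop3_no _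
  have e3 : (pvLoop3 (pvLoop2 (pvLoop1 l))).getLast? ≠ some ' ' :=
    pvLoop3_last _ (pvLoop2_last _ (pvLoop1_last _ h4))
  have hscan : pvScan false false (pvLoop3 (pvLoop2 (pvLoop1 l))) = pvScan false false l := by
    rw [pvLoop3_scan, pvLoop2_scan, pvLoop1_scan]
  rw [← hscan]
  exact (pvFix _ n1'' n2' n3 e3 false (by simp)).symm

theorem pvStripLast (s : String) : (PySem.Str.strip s).toList.getLast? ≠ some ' ' := by
  rw [PySem.Str.toList_strip]
  rw [PySem.Chars.strip]
  rw [PySem.Chars.rstrip]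
  rw [List.getLast?_reverse]
  intro h
  have := List.head?_dropWhile_not PySem.Chars.isspace (PySem.Chars.lstrip s.toList).reverse
  rw [h] at this
  simp at this
  exact absurd this (by simp [PySem.Chars.isspace])

-- ===== VERDICT (by name: the statement is the Claim_ definition above) =====
theorem get_string_and_normalize_spec : Claim_equal_get_string_and_normalize := by
  intro string _
  unfold Spec_get_string_and_normalize
  match string with
  | none => rfl
  | some s =>
    simp only [get_string_and_normalize, get_string_and_normalize_alt]
    rw [pvFoldl_eq]
    rw [List.nil_append]
    exact congrArg String.mk (pvMain _ (pvStripLast _))
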